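-- pv_equiv track=rewrite | github.com/yls1980/avo | .venv/lib/python3.9/site-packages/sqlfluff/core/helpers/string.py | get_trailing_whitespace_from_string
-- ===== SOURCE A (Python) =====
-- def get_trailing_whitespace_from_string(in_str: str) -> str:
--     r"""Returns the trailing whitespace from a string.
--
--     Designed to work with source strings of placeholders.
--
--     >>> get_trailing_whitespace_from_string("")
--     ''
--     >>> get_trailing_whitespace_from_string("foo")
--     ''
--     >>> get_trailing_whitespace_from_string("   ")
--     '   '
--     >>> get_trailing_whitespace_from_string("  foo ")
--     ' '
--     >>> get_trailing_whitespace_from_string("foo\n")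
--     '\n'
--     >>> get_trailing_whitespace_from_string("bar  \t  \n  \r ")
--     '  \t  \n  \r '
--     """
--     whitespace_chars = " \t\r\n"
--     if not in_str or in_str[-1] not in whitespace_chars:
--         return ""  # No whitespace
--     for i in range(1, len(in_str)):
--         if in_str[-(i + 1)] not in whitespace_chars:
--             # NOTE: The partial whitespace case is included as
--             # future-proofing. In testing it appears it is never
--             # required, and so only covered in the doctests above.
--             # doctest coverage isn't included in the overall coverage
--             # check and so the line below is excluded.
--             return in_str[-i:]  # pragma: no cover
--     else:
--         return in_str  # All whitespace
-- ===== SOURCE B (Python) =====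
-- def get_trailing_whitespace_from_string(in_str: str) -> str:
--     """Returns the trailing whitespace from a string."""
--     stripped = in_str.rstrip(" \t\r\n")
--     return in_str[len(stripped):]
-- ===== Notes on version B (the rewrite author's own statement) =====
-- stated objective: simpler
-- what changed: Replaces the backward index loop with all its branches by a single strip-then-slice decomposition: rstrip with the explicit character set, then slice off the removed suffix.
import Mathlib
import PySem

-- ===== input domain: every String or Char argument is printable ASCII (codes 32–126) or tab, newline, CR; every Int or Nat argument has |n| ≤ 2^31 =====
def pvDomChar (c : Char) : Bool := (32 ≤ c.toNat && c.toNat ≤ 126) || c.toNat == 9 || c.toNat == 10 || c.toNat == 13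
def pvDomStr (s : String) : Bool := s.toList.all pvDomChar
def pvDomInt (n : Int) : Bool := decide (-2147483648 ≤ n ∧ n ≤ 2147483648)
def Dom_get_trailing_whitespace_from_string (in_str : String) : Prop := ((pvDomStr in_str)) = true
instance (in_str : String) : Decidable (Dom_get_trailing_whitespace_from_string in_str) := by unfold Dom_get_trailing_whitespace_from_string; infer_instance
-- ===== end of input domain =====

-- B is simpler: the backward index loop with its branches becomes rstrip(" \t\r\n") then a slice of the removed suffix.

-- ===== PORT A =====
-- membership test `c in " \t\r\n"` (the whitespace_chars constant of A, reused by B)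
def pvWs (c : Char) : Bool := (" \t\r\n".toList).contains c

-- the `for i in range(1, len(in_str))` loop of A, over the list of indices
def gtwLoop (cs : List Char) : List Int → String
  | [] => String.mk cs                                     -- loop ended: all whitespace
  | i :: rest =>
    if pvWs (PySem.List.pyGetD cs (-(i + 1)) ' ') = false then
      String.mk (PySem.List.slice cs (some (-i)) none)     -- in_str[-i:]
    else
      gtwLoop cs rest

def get_trailing_whitespace_from_string (in_str : String) : String :=
  let cs := in_str.toList
  if cs = [] then ""                                       -- `not in_str` (short-circuit)
  else if pvWs (PySem.List.pyGetD cs (-1) ' ') = false then ""   -- `in_str[-1] not in whitespace_chars`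
  else gtwLoop cs (PySem.List.pyRange 1 (PySem.List.len cs) 1)

-- ===== PORT B =====
-- hand port of str.rstrip(" \t\r\n"): drop the trailing run of those chars (exact on any string);
-- then in_str[len(stripped):]
def get_trailing_whitespace_from_string_alt (in_str : String) : String :=
  String.mk (PySem.List.slice in_str.toList
    (some (((in_str.toList.reverse.dropWhile pvWs).reverse).length : Int)) none)

-- ===== PRECONDITION & SPEC =====
def Spec_get_trailing_whitespace_from_string (in_str : String) (out : String) : Prop := out = get_trailing_whitespace_from_string_alt in_str
instance (in_str : String) (out : String) : Decidable (Spec_get_trailing_whitespace_from_string in_str out) := by unfold Spec_get_trailing_whitespace_from_string; infer_instance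

-- ===== CLAIM (what is proved, stated in full; the proofs are below) =====
def Claim_equal_get_trailing_whitespace_from_string : Prop := ∀ (in_str : String), Dom_get_trailing_whitespace_from_string in_str → Spec_get_trailing_whitespace_from_string in_str (get_trailing_whitespace_from_string in_str)

-- ===== LEMMAS AND PROOFS =====

-- B computes the reversed takeWhile of the reversed characters
theorem alt_eq (in_str : String) :
    get_trailing_whitespace_from_string_alt in_str
      = String.mk ((in_str.toList.reverse.takeWhile pvWs).reverse) := by
  unfold get_trailing_whitespace_from_string_alt
  rw [PySem.List.slice_from_natCast]
  congr 1
  have h1 : in_str.toList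
      = (in_str.toList.reverse.dropWhile pvWs).reverse
        ++ (in_str.toList.reverse.takeWhile pvWs).reverse := by
    conv_lhs => rw [← List.reverse_reverse in_str.toList,
      ← List.takeWhile_append_dropWhile (p := pvWs) (l := in_str.toList.reverse)]
    rw [List.reverse_append]
  conv_lhs => rw [h1]
  simp

-- takeWhile stops exactly at the first failing index
theorem takeWhile_eq_take_of (p : Char → Bool) (l : List Char) (k : Nat)
    (h1 : (l.take k).all p = true) (h2 : k < l.length) (h3 : p l[k] = false) :
    l.takeWhile p = l.take k := by
  induction l generalizing k with
  | nil => simp at h2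
  | cons x xs ih =>
    cases k with
    | zero =>
      rw [List.take_zero, List.takeWhile_cons]
      simp [show p x = false from by simpa using h3]
    | succ k =>
      simp only [List.take_succ_cons, List.all_cons, Bool.and_eq_true] at h1
      rw [List.take_succ_cons, List.takeWhile_cons, if_pos h1.1]
      rw [ih k h1.2 (by simpa using h2) (by simpa using h3)]

-- the loop invariant: if the first k reversed chars are all whitespace, the remaining
-- loop computes the reversed takeWhile
theorem gtwLoop_eq (cs : List Char) (k : Nat) (hk : 1 ≤ k)
    (hall : (cs.reverse.take k).all pvWs = true) :
    gtwLoop cs (PySem.List.pyRange (k : Int) (PySem.List.len cs) 1)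
      = String.mk ((cs.reverse.takeWhile pvWs).reverse) := by
  by_cases h : cs.length ≤ k
  · rw [PySem.List.pyRange_one_eq_nil (by simp [PySem.List.len_eq]; omega)]
    have htake : cs.reverse.take k = cs.reverse := List.take_of_length_le (by simpa using h)
    rw [htake] at hall
    have : cs.reverse.takeWhile pvWs = cs.reverse :=
      List.takeWhile_eq_self_iff.mpr (by simpa [List.all_eq_true] using hall)
    rw [this]; simp [gtwLoop]
  · rw [Nat.not_le] at h
    rw [PySem.List.pyRange_one_cons (by simp [PySem.List.len_eq]; omega)]
    have hkrev : k < cs.reverse.length := by simpa using h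
    have hidx : PySem.List.pyGetD cs (-((k : Int) + 1)) ' ' = cs.reverse[k] := by
      have hc : -((k : Int) + 1) = -(((k + 1 : Nat) : Int)) := by push_cast; ring
      rw [hc, PySem.List.pyGetD_neg_natCast cs (k + 1) ' ' (by omega) (by omega)]
      rw [List.getElem_reverse]
      congr 1
      omega
    unfold gtwLoop
    rw [hidx]
    by_cases hws : pvWs cs.reverse[k] = false
    · rw [if_pos (by rw [hws])]
      rw [PySem.List.slice_from_neg_natCast cs k (by omega)]
      have htw : cs.reverse.takeWhile pvWs = cs.reverse.take k :=
        takeWhile_eq_take_of pvWs cs.reverse k hall hkrev hws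
      rw [htw, List.reverse_take, List.reverse_reverse, List.length_reverse]
    · rw [if_neg (by simpa using hws)]
      have hall' : (cs.reverse.take (k + 1)).all pvWs = true := by
        rw [List.take_add_one]
        simp only [List.all_append, hall, Bool.true_and]
        rw [List.getElem?_eq_getElem hkrev]
        simpa using hws
      have hrec := gtwLoop_eq cs (k + 1) (by omega) hall'
      rw [← hrec]
      norm_cast
termination_by cs.length - k

-- ===== VERDICT (by name: the statement is the Claim_ definition above) =====
theorem get_trailing_whitespace_from_string_spec : Claim_equal_get_trailing_whitespace_from_string := by
  intro in_str _
  unfold Spec_get_trailing_whitespace_from_string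
  rw [alt_eq]
  unfold get_trailing_whitespace_from_string
  by_cases hnil : in_str.toList = []
  · rw [if_pos hnil, hnil]
    rfl
  · rw [if_neg hnil]
    obtain ⟨r, rest, hrev⟩ : ∃ r rest, in_str.toList.reverse = r :: rest := by
      cases h : in_str.toList.reverse with
      | nil => exact absurd (by simpa using congrArg List.reverse h) hnil
      | cons a l => exact ⟨a, l, rfl⟩
    have hcsr : in_str.toList = rest.reverse ++ [r] := by
      rw [← List.reverse_reverse in_str.toList, hrev]; simp
    have hidx : PySem.List.pyGetD in_str.toList (-1) ' ' = r := by
      rw [hcsr]; exact PySem.List.pyGetD_neg_one_append_singleton rest.reverse r ' '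
    by_cases hws : pvWs (PySem.List.pyGetD in_str.toList (-1) ' ') = false
    · rw [if_pos hws]
      have hr : pvWs r = false := by rw [hidx] at hws; exact hws
      rw [hrev, List.takeWhile_cons, hr]
      simp only [Bool.false_eq_true, if_false]
      rfl
    · rw [if_neg hws]
      apply gtwLoop_eq in_str.toList 1 (le_refl 1)
      rw [hrev]
      have : pvWs r = true := by
        rw [hidx] at hws; revert hws; cases pvWs r <;> simp
      simp [this]
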